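-- pv_equiv track=rewrite | github.com/t1ooo/geeksforgeeks | minimum-length-subarray-sum-greater-given-value/main.py | smallestSubarrayV2
-- ===== SOURCE A (Python) =====
-- def smallestSubarrayV2(arr, n, x):
--     dp = [[0] * (n+1) for _ in range(n)]
--     for ln in range(1, n+1):
--         for l in range(n-ln+1):
--             r = l+ln
--
--             sm = 0
--             if ln == 1:
--                 sm = arr[l]
--             else:
--                 sm = dp[l][r-1] + arr[r-1]
--
--             dp[l][r] = sm
--
--             if sm > x:
--                 return ln
--
--     return -1
-- ===== SOURCE B (Python) =====
-- def smallestSubarrayV2(arr, n, x):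
--     # O(n): prefix sums + monotonic queue (shortest subarray with sum > x)
--     if n <= 0:
--         return -1
--     pre = [0]
--     for v in arr[:n]:
--         pre.append(pre[-1] + v)
--     best = -1
--     dq = []   # candidate prefix indices; pre strictly increasing along dq[head:]
--     head = 0
--     for j in range(n + 1):
--         while head < len(dq) and pre[j] - pre[dq[head]] > x:
--             ln = j - dq[head]
--             if best == -1 or ln < best:
--                 best = ln
--             head += 1
--         while len(dq) > head and pre[dq[-1]] >= pre[j]:
--             dq.pop()
--         dq.append(j)
--     return best
-- ===== Notes on version B (the rewrite author's own statement) =====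
-- stated objective: faster
-- what changed: A checks every window length in increasing order with an O(n^2) DP table of window sums; B computes prefix sums once and runs the standard monotonic-queue scan, finding the shortest subarray with sum > x in O(n) time and space.
-- outside the precondition, e.g. on smallestSubarrayV2([100], 3, 0): A returns 1, B raises IndexError
import Mathlib
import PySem

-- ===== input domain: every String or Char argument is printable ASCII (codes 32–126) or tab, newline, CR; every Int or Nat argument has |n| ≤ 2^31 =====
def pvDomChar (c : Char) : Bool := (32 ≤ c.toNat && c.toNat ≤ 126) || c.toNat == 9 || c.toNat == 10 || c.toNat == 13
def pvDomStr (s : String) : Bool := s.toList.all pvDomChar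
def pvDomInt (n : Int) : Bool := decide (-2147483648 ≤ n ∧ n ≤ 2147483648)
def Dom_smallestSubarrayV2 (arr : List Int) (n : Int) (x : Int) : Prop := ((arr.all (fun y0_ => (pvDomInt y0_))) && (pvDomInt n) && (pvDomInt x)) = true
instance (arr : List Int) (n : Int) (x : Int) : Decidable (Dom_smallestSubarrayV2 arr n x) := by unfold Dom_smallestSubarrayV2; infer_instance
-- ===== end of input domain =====

-- B replaces A's O(n^2)-time/space length-by-length DP table with prefix sums and a
-- monotonic queue (shortest subarray with sum > x), an O(n) algorithm.

-- ===== PORT A =====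
-- inner 'for l in range(n-ln+1)' loop; 'none' = Python's early 'return ln'
def pvAInner (arr : List Int) (x ln : Int) : List Int → List (List Int) → Option (List (List Int))
  | [], dp => some dp
  | l :: ls, dp =>
    let r := l + ln
    let sm : Int :=
      if ln = 1 then PySem.List.pyGetD arr l 0
      else PySem.List.pyGetD (PySem.List.pyGetD dp l []) (r - 1) 0 + PySem.List.pyGetD arr (r - 1) 0
    let dp' := PySem.List.pySetD dp l (PySem.List.pySetD (PySem.List.pyGetD dp l []) r sm)
    if sm > x then none else pvAInner arr x ln ls dp'

-- outer 'for ln in range(1, n+1)' loop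
def pvAOuter (arr : List Int) (x n : Int) : List Int → List (List Int) → Int
  | [], _ => -1
  | ln :: lns, dp =>
    match pvAInner arr x ln (PySem.List.pyRange 0 (n - ln + 1) 1) dp with
    | none => ln
    | some dp' => pvAOuter arr x n lns dp'

def smallestSubarrayV2 (arr : List Int) (n : Int) (x : Int) : Int :=
  let dp := (PySem.List.pyRange 0 n 1).map (fun _ => PySem.List.pyRepeat [(0 : Int)] (n + 1))
  pvAOuter arr x n (PySem.List.pyRange 1 (n + 1) 1) dp

-- ===== PORT B =====
-- first while loop: pop qualifying prefix indices from the queue front, recording lengths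
-- (fuel = dq.length - head bounds the trip count; the loop condition itself is unchanged)
def pvBFront (pre dq : List Int) (x j : Int) : Nat → Int → Nat → Int × Nat
  | 0, best, head => (best, head)
  | fuel + 1, best, head =>
    if head < dq.length ∧
        PySem.List.pyGetD pre j 0 - PySem.List.pyGetD pre (PySem.List.pyGetD dq (head : Int) 0) 0 > x then
      let ln := j - PySem.List.pyGetD dq (head : Int) 0
      let best' := if best = -1 ∨ ln < best then ln else best
      pvBFront pre dq x j fuel best' (head + 1)
    else (best, head)

-- second while loop: dq.pop() while the back has a prefix sum ≥ pre[j]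
-- (fuel = dq.length bounds the trip count; the loop condition itself is unchanged)
def pvBBack (pre : List Int) (j : Int) (head : Nat) : Nat → List Int → List Int
  | 0, dq => dq
  | fuel + 1, dq =>
    if head < dq.length ∧
        PySem.List.pyGetD pre (PySem.List.pyGetD dq (-1) 0) 0 ≥ PySem.List.pyGetD pre j 0 then
      pvBBack pre j head fuel dq.dropLast
    else dq

-- 'for j in range(n+1)' loop with state (best, dq, head)
def pvBLoop (pre : List Int) (x : Int) : List Int → Int → List Int → Nat → Int
  | [], best, _, _ => best
  | j :: js, best, dq, head =>
    let bh := pvBFront pre dq x j (dq.length - head) best head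
    let dq' := pvBBack pre j bh.2 dq.length dq
    pvBLoop pre x js bh.1 (dq' ++ [j]) bh.2

def smallestSubarrayV2_alt (arr : List Int) (n : Int) (x : Int) : Int :=
  if n ≤ 0 then -1
  else
    let pre := (PySem.List.slice arr none (some n)).foldl
      (fun p v => p ++ [PySem.List.pyGetD p (-1) 0 + v]) [(0 : Int)]
    pvBLoop pre x (PySem.List.pyRange 0 (n + 1) 1) (-1) [] 0

-- ===== PRECONDITION & SPEC =====
-- Pre_ excludes n > len(arr), outside the function's natural domain: there A indexes past
-- the array and raises IndexError unless some early window already exceeds x.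
def Pre_smallestSubarrayV2 (arr : List Int) (n : Int) (x : Int) : Prop := n ≤ (arr.length : Int)
instance (arr : List Int) (n : Int) (x : Int) : Decidable (Pre_smallestSubarrayV2 arr n x) := by
  unfold Pre_smallestSubarrayV2; infer_instance

def pvWitness_smallestSubarrayV2 : List Int × Int × Int := ([2, -1, 3], 3, 3)

def Spec_smallestSubarrayV2 (arr : List Int) (n : Int) (x : Int) (out : Int) : Prop := out = smallestSubarrayV2_alt arr n x
instance (arr : List Int) (n : Int) (x : Int) (out : Int) : Decidable (Spec_smallestSubarrayV2 arr n x out) := by unfold Spec_smallestSubarrayV2; infer_instance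

-- ===== CLAIM (what is proved, stated in full; the proofs are below) =====
def Claim_equal_smallestSubarrayV2 : Prop := ∀ (arr : List Int) (n : Int) (x : Int), Dom_smallestSubarrayV2 arr n x → Pre_smallestSubarrayV2 arr n x → Spec_smallestSubarrayV2 arr n x (smallestSubarrayV2 arr n x)

-- ===== LEMMAS AND PROOFS =====

-- prefix sum of the first k elements
def pvP (arr : List Int) (k : Nat) : Int := (arr.take k).sum

-- "some window of length ln, inside the first N elements, sums to more than x"
def pvOkL (arr : List Int) (x : Int) (N ln : Nat) : Bool :=
  (List.range (N + 1 - ln)).any (fun l => decide (pvP arr (l + ln) - pvP arr l > x))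

-- the common reference value: least qualifying length in [1..N], else -1
def pvAns (arr : List Int) (x : Int) (N : Nat) : Int :=
  match (List.range' 1 N).find? (pvOkL arr x N) with
  | some ln => (ln : Int)
  | none => -1

-- dp has N rows of length N+1
def pvDims (dp : List (List Int)) (N : Nat) : Prop := dp.length = N ∧ ∀ row ∈ dp, row.length = N + 1

-- the entry dp[l][c], read exactly as the port reads it
def pvVal (dp : List (List Int)) (l c : Nat) : Int :=
  PySem.List.pyGetD (PySem.List.pyGetD dp (l : Int) []) (c : Int) 0

lemma pvP_succ (arr : List Int) (l : Nat) (h : l < arr.length) :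
    pvP arr (l + 1) = pvP arr l + arr.getD l 0 := by
  unfold pvP
  rw [List.sum_take_succ arr l h, List.getD_eq_getElem arr 0 h]

lemma pvOkL_iff (arr : List Int) (x : Int) (N ln : Nat) (h2 : ln ≤ N) :
    pvOkL arr x N ln = true ↔ ∃ l, l + ln ≤ N ∧ pvP arr (l + ln) - pvP arr l > x := by
  simp only [pvOkL, List.any_eq_true, List.mem_range, decide_eq_true_eq]
  constructor
  · rintro ⟨l, hl, hgt⟩; exact ⟨l, by omega, hgt⟩
  · rintro ⟨l, hl, hgt⟩; exact ⟨l, by omega, hgt⟩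

lemma pvAInner_spec (arr : List Int) (x : Int) (N ln : Nat) (hlen : N ≤ arr.length)
    (hln1 : 1 ≤ ln) (hlnN : ln ≤ N) :
    ∀ (cnt l0 : Nat) (dp : List (List Int)), l0 + cnt = N + 1 - ln →
    pvDims dp N →
    (∀ l, l0 ≤ l → l + ln ≤ N → pvVal dp l (l + ln - 1) = pvP arr (l + ln - 1) - pvP arr l) →
    (∀ l, l < l0 → l + ln ≤ N → pvVal dp l (l + ln) = pvP arr (l + ln) - pvP arr l) →
    ((∃ l, l0 ≤ l ∧ l + ln ≤ N ∧ pvP arr (l + ln) - pvP arr l > x) →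
        pvAInner arr x ln (PySem.List.pyRange (l0 : Int) ((N + 1 - ln : Nat) : Int) 1) dp = none) ∧
    (¬ (∃ l, l0 ≤ l ∧ l + ln ≤ N ∧ pvP arr (l + ln) - pvP arr l > x) →
        ∃ dp', pvAInner arr x ln (PySem.List.pyRange (l0 : Int) ((N + 1 - ln : Nat) : Int) 1) dp = some dp' ∧
          pvDims dp' N ∧ ∀ l, l + ln ≤ N → pvVal dp' l (l + ln) = pvP arr (l + ln) - pvP arr l) := by
  intro cnt
  induction cnt with
  | zero =>
    intro l0 dp hcnt hdims hd1 hd2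
    have hnil : PySem.List.pyRange (l0 : Int) ((N + 1 - ln : Nat) : Int) 1 = [] :=
      PySem.List.pyRange_one_eq_nil (by omega)
    rw [hnil]
    constructor
    · rintro ⟨l, hl0, hlN, _⟩; omega
    · intro _
      exact ⟨dp, by simp [pvAInner], hdims, fun l hl => hd2 l (by omega) hl⟩
  | succ cnt ih =>
    intro l0 dp hcnt hdims hd1 hd2
    have hlt : l0 < N + 1 - ln := by omega
    have hcons : PySem.List.pyRange (l0 : Int) ((N + 1 - ln : Nat) : Int) 1 =
        (l0 : Int) :: PySem.List.pyRange ((l0 + 1 : Nat) : Int) ((N + 1 - ln : Nat) : Int) 1 := by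
      have := PySem.List.pyRange_one_cons (a := (l0 : Int)) (b := ((N + 1 - ln : Nat) : Int))
        (by exact_mod_cast Nat.cast_lt.mpr hlt)
      rw [this]; norm_num
    have hlN : l0 + ln ≤ N := by omega
    have hl0len : l0 < arr.length := by omega
    have hl1len : l0 + ln - 1 < arr.length := by omega
    -- the computed sum equals the window sum
    set sm : Int := (if (ln : Int) = 1 then PySem.List.pyGetD arr (l0 : Int) 0
      else PySem.List.pyGetD (PySem.List.pyGetD dp (l0 : Int) []) ((l0 : Int) + (ln : Int) - 1) 0 +
        PySem.List.pyGetD arr ((l0 : Int) + (ln : Int) - 1) 0) with hsm_def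
    have hsm : sm = pvP arr (l0 + ln) - pvP arr l0 := by
      rw [hsm_def]
      by_cases h1 : ln = 1
      · subst h1
        rw [if_pos (by norm_num)]
        rw [PySem.List.pyGetD_natCast]
        have := pvP_succ arr l0 hl0len
        omega
      · rw [if_neg (by exact_mod_cast h1)]
        have hc : (l0 : Int) + (ln : Int) - 1 = ((l0 + ln - 1 : Nat) : Int) := by omega
        rw [hc]
        simp only [PySem.List.pyGetD_natCast]
        have hv := hd1 l0 (le_refl _) hlN
        simp only [pvVal, PySem.List.pyGetD_natCast] at hv
        have harr : arr.getD (l0 + ln - 1) 0 = pvP arr (l0 + ln) - pvP arr (l0 + ln - 1) := by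
          have := pvP_succ arr (l0 + ln - 1) hl1len
          have he : l0 + ln - 1 + 1 = l0 + ln := by omega
          rw [he] at this; omega
        omega
    -- the updated table
    set row0 : List Int := PySem.List.pyGetD dp (l0 : Int) [] with hrow0
    have hl0dp : l0 < dp.length := by have := hdims.1; omega
    have hrow0mem : row0 ∈ dp := by
      rw [hrow0, PySem.List.pyGetD_natCast]
      rw [List.getD_eq_getElem dp [] hl0dp]
      exact List.getElem_mem hl0dp
    have hrow0len : row0.length = N + 1 := hdims.2 row0 hrow0mem
    set nr : List Int := PySem.List.pySetD row0 ((l0 : Int) + (ln : Int)) sm with hnr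
    have hcol : (l0 : Int) + (ln : Int) = ((l0 + ln : Nat) : Int) := by push_cast; ring
    have hnr' : nr = row0.set (l0 + ln) sm := by rw [hnr, hcol, PySem.List.pySetD_natCast]
    set dp' : List (List Int) := PySem.List.pySetD dp (l0 : Int) nr with hdp'
    have hdp'' : dp' = dp.set l0 nr := by rw [hdp', PySem.List.pySetD_natCast]
    have hdimdp' : pvDims dp' N := by
      constructor
      · rw [hdp'']; simp [hdims.1]
      · intro row hrow
        rw [hdp''] at hrow
        rcases List.mem_or_eq_of_mem_set hrow with h | h
        · exact hdims.2 row h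
        · rw [h, hnr']; simp [hrow0len]
    have hval : ∀ l c : Nat, pvVal dp' l c = if l = l0 ∧ c = l0 + ln then sm else pvVal dp l c := by
      intro l c
      rw [pvVal, hdp', PySem.List.pyGetD_pySetD_natCast dp l0 l nr [] hl0dp]
      by_cases hl : l = l0
      · rw [if_pos hl, hnr, hcol, PySem.List.pyGetD_pySetD_natCast row0 (l0 + ln) c sm 0 (by omega)]
        by_cases hcc : c = l0 + ln
        · simp [hl, hcc]
        · rw [if_neg hcc, if_neg (by tauto), pvVal, hl, hrow0]
      · rw [if_neg hl, if_neg (by tauto), pvVal]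
    -- one unfolding step of the loop
    rw [hcons]
    by_cases hgt : sm > x
    · have hstep : pvAInner arr x (ln : Int)
          ((l0 : Int) :: PySem.List.pyRange ((l0 + 1 : Nat) : Int) ((N + 1 - ln : Nat) : Int) 1) dp = none := by
        simp only [pvAInner]
        rw [← hsm_def]
        rw [if_pos hgt]
      constructor
      · intro _; exact hstep
      · intro hno; exact absurd ⟨l0, le_refl _, hlN, by omega⟩ hno
    · have hstep : pvAInner arr x (ln : Int)
          ((l0 : Int) :: PySem.List.pyRange ((l0 + 1 : Nat) : Int) ((N + 1 - ln : Nat) : Int) 1) dp =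
          pvAInner arr x (ln : Int) (PySem.List.pyRange ((l0 + 1 : Nat) : Int) ((N + 1 - ln : Nat) : Int) 1) dp' := by
        simp only [pvAInner]
        rw [← hsm_def]
        rw [if_neg hgt, ← hdp']
      have ihspec := ih (l0 + 1) dp' (by omega) hdimdp'
        (by
          intro l hl hlN'
          rw [hval l (l + ln - 1), if_neg (by omega)]
          exact hd1 l (by omega) hlN')
        (by
          intro l hl hlN'
          by_cases hll : l = l0
          · subst hll; rw [hval l (l + ln), if_pos ⟨rfl, rfl⟩, hsm]
          · rw [hval l (l + ln), if_neg (by omega)]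
            exact hd2 l (by omega) hlN')
      constructor
      · rintro ⟨l, hl, hlN', hw⟩
        rw [hstep]
        apply ihspec.1
        refine ⟨l, by
          rcases Nat.eq_or_lt_of_le hl with h | h
          · exfalso; rw [← h] at hw; omega
          · omega, hlN', hw⟩
      · intro hno
        rw [hstep]
        apply ihspec.2
        rintro ⟨l, hl, hlN', hw⟩
        exact hno ⟨l, by omega, hlN', hw⟩

lemma pvAOuter_spec (arr : List Int) (x : Int) (N : Nat) (hlen : N ≤ arr.length) :
    ∀ (cnt ln0 : Nat) (dp : List (List Int)), 1 ≤ ln0 → ln0 + cnt = N + 1 →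
    pvDims dp N →
    (∀ l, l + (ln0 - 1) ≤ N → pvVal dp l (l + (ln0 - 1)) = pvP arr (l + (ln0 - 1)) - pvP arr l) →
    pvAOuter arr x (N : Int) (PySem.List.pyRange (ln0 : Int) ((N : Int) + 1) 1) dp =
      (match (List.range' ln0 (N + 1 - ln0)).find? (pvOkL arr x N) with
       | some ln => (ln : Int) | none => -1) := by
  intro cnt
  induction cnt with
  | zero =>
    intro ln0 dp h1 hcnt hdims hd
    have : ln0 = N + 1 := by omega
    subst this
    have hnil : PySem.List.pyRange ((N + 1 : Nat) : Int) ((N : Int) + 1) 1 = [] :=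
      PySem.List.pyRange_one_eq_nil (by omega)
    rw [hnil]
    simp [pvAOuter]
  | succ cnt ih =>
    intro ln0 dp h1 hcnt hdims hd
    have hln0N : ln0 ≤ N := by omega
    have hcons : PySem.List.pyRange (ln0 : Int) ((N : Int) + 1) 1 =
        (ln0 : Int) :: PySem.List.pyRange ((ln0 + 1 : Nat) : Int) ((N : Int) + 1) 1 := by
      have := PySem.List.pyRange_one_cons (a := (ln0 : Int)) (b := (N : Int) + 1)
        (by omega)
      rw [this]; norm_num
    rw [hcons]
    have hbound : ((N : Int) - (ln0 : Int) + 1) = ((N + 1 - ln0 : Nat) : Int) := by omega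
    have hinner := pvAInner_spec arr x N ln0 hlen h1 hln0N (N + 1 - ln0) 0 dp (by omega) hdims
      (by intro l _ hl
          have h2 : l + (ln0 - 1) = l + ln0 - 1 := by omega
          have hh := hd l (by omega)
          rw [h2] at hh
          exact hh)
      (by intro l hl; omega)
    have hrange' : List.range' ln0 (N + 1 - ln0) = ln0 :: List.range' (ln0 + 1) (N + 1 - (ln0 + 1)) := by
      have : N + 1 - ln0 = (N + 1 - (ln0 + 1)) + 1 := by omega
      rw [this, List.range'_succ]
    simp only [Nat.cast_zero] at hinner
    by_cases hex : ∃ l, 0 ≤ l ∧ l + ln0 ≤ N ∧ pvP arr (l + ln0) - pvP arr l > x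
    · have hnone := hinner.1 hex
      simp only [pvAOuter]
      rw [hbound, hnone]
      have hok : pvOkL arr x N ln0 = true := by
        rw [pvOkL_iff arr x N ln0 hln0N]
        obtain ⟨l, _, h2, h3⟩ := hex; exact ⟨l, h2, h3⟩
      rw [hrange', List.find?_cons_of_pos hok]
    · obtain ⟨dp', hsome, hdims', hvals'⟩ := hinner.2 hex
      simp only [pvAOuter]
      rw [hbound, hsome]
      have hih := ih (ln0 + 1) dp' (by omega) (by omega) hdims'
        (by intro l hl
            have he : ln0 + 1 - 1 = ln0 := by omega
            rw [he] at hl ⊢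
            exact hvals' l hl)
      have hok : pvOkL arr x N ln0 = false := by
        rw [← Bool.not_eq_true, pvOkL_iff arr x N ln0 hln0N]
        rintro ⟨l, h2, h3⟩; exact hex ⟨l, by omega, h2, h3⟩
      rw [hrange', List.find?_cons_of_neg (by simp [hok])]
      have hcast : ((ln0 + 1 : Nat) : Int) = (ln0 : Int) + 1 := by push_cast; ring
      rw [hcast] at hih
      simpa using hih

lemma pvA_eq (arr : List Int) (n x : Int) (h0 : 0 < n) (hlen : n ≤ (arr.length : Int)) :
    smallestSubarrayV2 arr n x = pvAns arr x n.toNat := by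
  obtain ⟨N, rfl⟩ : ∃ N : Nat, n = (N : Int) := ⟨n.toNat, by omega⟩
  rw [Int.toNat_natCast]
  have hlenN : N ≤ arr.length := by omega
  have hmain : smallestSubarrayV2 arr (N : Int) x =
      pvAOuter arr x (N : Int) (PySem.List.pyRange 1 ((N : Int) + 1) 1)
        ((PySem.List.pyRange 0 (N : Int) 1).map
          (fun _ => PySem.List.pyRepeat [(0 : Int)] ((N : Int) + 1))) := rfl
  rw [hmain]
  have hdp0 : ((PySem.List.pyRange 0 (N : Int) 1).map
      (fun _ => PySem.List.pyRepeat [(0 : Int)] ((N : Int) + 1))) =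
      List.replicate N (List.replicate (N + 1) (0 : Int)) := by
    rw [PySem.List.pyRepeat_singleton]
    have h1 : ((N : Int) + 1).toNat = N + 1 := by omega
    rw [h1, List.map_const']
    congr 1
    rw [PySem.List.length_pyRange_one]
    omega
  rw [hdp0]
  have hzero : ∀ l c : Nat, pvVal (List.replicate N (List.replicate (N + 1) (0 : Int))) l c = 0 := by
    intro l c
    simp only [pvVal, PySem.List.pyGetD_natCast]
    by_cases hl : l < N
    · rw [List.getD_eq_getElem (List.replicate N (List.replicate (N + 1) (0 : Int))) []
        (by simpa using hl), List.getElem_replicate]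
      by_cases hc : c < N + 1
      · rw [List.getD_eq_getElem (List.replicate (N + 1) (0 : Int)) 0 (by simpa using hc),
          List.getElem_replicate]
      · rw [List.getD_eq_default (List.replicate (N + 1) (0 : Int)) 0 (by simpa using hc)]
    · rw [List.getD_eq_default (List.replicate N (List.replicate (N + 1) (0 : Int))) []
        (by simpa using hl)]
      simp
  have h := pvAOuter_spec arr x N hlenN N 1 (List.replicate N (List.replicate (N + 1) (0 : Int)))
    (le_refl 1) (by omega)
    (by constructor
        · simp
        · intro row hrow
          rw [List.eq_of_mem_replicate hrow]; simp)
    (by intro l hl; rw [hzero]; simp)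
  simp only [Nat.cast_one] at h
  rw [h]
  have : N + 1 - 1 = N := by omega
  rw [this]
  rfl

-- ===== B-side helpers =====

-- Source B's best-update: best = ln if best == -1 or ln < best else best
def pvMinUpd (b v : Int) : Int := if b = -1 ∨ v < b then v else b

-- front-pop condition at step j
def pvQ (arr : List Int) (x : Int) (j i : Nat) : Bool := decide (pvP arr j - pvP arr i > x)

-- reference for the back-pop loop: remove the maximal suffix with pre value ≥ pre[j]
def pvBackRef (arr : List Int) (j : Nat) (D : List Nat) : List Nat :=
  ((D.reverse).dropWhile (fun i => decide (pvP arr j ≤ pvP arr i))).reverse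

lemma pvDropLast_drop {α : Type} (l : List α) (n : Nat) :
    (l.drop n).dropLast = l.dropLast.drop n := by
  rw [List.dropLast_eq_take, List.dropLast_eq_take, List.drop_take, List.length_drop]
  congr 1
  omega

lemma pvTake_dropLast {α : Type} (l : List α) (n : Nat) (h : n < l.length) :
    l.dropLast.take n = l.take n := by
  rw [List.dropLast_eq_take, List.take_take]
  congr 1
  omega

-- bridge: the port's front loop computes a fold over the takeWhile prefix
lemma pvBFront_bridge (arr pre : List Int) (x : Int) (N jn : Nat)
    (hpre : ∀ k : Nat, k ≤ N → PySem.List.pyGetD pre (k : Int) 0 = pvP arr k)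
    (hj : jn ≤ N) :
    ∀ (D : List Nat) (dq : List Int) (head fuel : Nat) (best : Int),
      head ≤ dq.length → dq.drop head = List.map (fun i : Nat => (i : Int)) D →
      (∀ i ∈ D, i ≤ N) →
      dq.length - head ≤ fuel →
      pvBFront pre dq x (jn : Int) fuel best head =
        ((D.takeWhile (pvQ arr x jn)).foldl (fun (b : Int) (i : Nat) => pvMinUpd b ((jn : Int) - (i : Int))) best,
         head + (D.takeWhile (pvQ arr x jn)).length) := by
  intro D
  induction D with
  | nil =>
    intro dq head fuel best hle hdrop _ hfuel
    have hlen : dq.length ≤ head := by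
      have := congrArg List.length hdrop
      simp at this
      omega
    have hhead : ¬ head < dq.length := by omega
    cases fuel with
    | zero => simp [pvBFront, List.takeWhile]
    | succ f =>
      simp only [pvBFront, List.takeWhile]
      rw [if_neg (by tauto)]
      simp
  | cons i D ih =>
    intro dq head fuel best hle hdrop hmem hfuel
    have hlt : head < dq.length := by
      by_contra hc
      rw [List.drop_eq_nil_of_le (by omega)] at hdrop
      simp at hdrop
    have hlen : dq.length - head = D.length + 1 := by
      have := congrArg List.length hdrop
      simp at this
      omega
    cases fuel with
    | zero => omega
    | succ f =>
      have hget : PySem.List.pyGetD dq (head : Int) 0 = (i : Int) := by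
        rw [PySem.List.pyGetD_natCast, List.getD_eq_getElem dq 0 hlt]
        have h0 : 0 < (dq.drop head).length := by rw [hdrop]; simp
        have e1 : (dq.drop head)[0]'h0 = dq[head] := by
          simp [List.getElem_drop (xs := dq) (i := head) (j := 0) (h := h0)]
        have e2 : (dq.drop head)[0]'h0 =
            (List.map (fun i : Nat => (i : Int)) (i :: D))[0]'(by simp) := List.getElem_of_eq hdrop _
        rw [← e1, e2]
        simp
      have hqi : PySem.List.pyGetD pre (jn : Int) 0 - PySem.List.pyGetD pre ((i : Nat) : Int) 0 =
          pvP arr jn - pvP arr i := by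
        rw [hpre jn hj, hpre i (hmem i (by simp))]
      simp only [pvBFront]
      by_cases hq : pvP arr jn - pvP arr i > x
      · rw [if_pos ⟨hlt, by rw [hget, hqi]; exact hq⟩]
        have hdrop' : dq.drop (head + 1) = List.map (fun i : Nat => (i : Int)) D := by
          have : dq.drop (head + 1) = (dq.drop head).drop 1 := by
            rw [List.drop_drop]
          rw [this, hdrop]
          simp
        have hrec := ih dq (head + 1) f
          (pvMinUpd best ((jn : Int) - (i : Int)))
          (by omega) hdrop' (fun a ha => hmem a (by simp [ha])) (by omega)
        rw [hget,
          show (if best = -1 ∨ ((jn : Int) - (i : Int)) < best then (jn : Int) - (i : Int) else best)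
            = pvMinUpd best ((jn : Int) - (i : Int)) from rfl, hrec]
        have htw : (i :: D).takeWhile (pvQ arr x jn) = i :: D.takeWhile (pvQ arr x jn) :=
          List.takeWhile_cons_of_pos (by simp [pvQ]; exact hq)
        rw [htw]
        simp
        omega
      · rw [if_neg (by rintro ⟨_, hc⟩; rw [hget, hqi] at hc; exact hq hc)]
        have htw : (i :: D).takeWhile (pvQ arr x jn) = [] :=
          List.takeWhile_cons_of_neg (by simp [pvQ]; omega)
        rw [htw]
        simp

-- bridge: the port's back loop computes pvBackRef on the active part of the queue
lemma pvBBack_bridge (arr pre : List Int) (N jn : Nat)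
    (hpre : ∀ k : Nat, k ≤ N → PySem.List.pyGetD pre (k : Int) 0 = pvP arr k)
    (hj : jn ≤ N) :
    ∀ (fuel : Nat) (D : List Nat) (dq : List Int) (head : Nat),
      head ≤ dq.length → dq.drop head = List.map (fun i : Nat => (i : Int)) D →
      (∀ i ∈ D, i ≤ N) →
      D.length ≤ fuel →
      pvBBack pre (jn : Int) head fuel dq =
        dq.take head ++ List.map (fun i : Nat => (i : Int)) (pvBackRef arr jn D) := by
  intro fuel
  induction fuel with
  | zero =>
    intro D dq head hle hdrop _ hfuel
    have hD : D = [] := by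
      cases D
      · rfl
      · simp at hfuel
    subst hD
    simp at hdrop
    simp [pvBBack, pvBackRef]
    omega
  | succ f ih =>
    intro D dq head hle hdrop hmem hfuel
    rcases List.eq_nil_or_concat D with hD | ⟨D0, i, hD⟩
    · subst hD
      simp at hdrop
      have : ¬ head < dq.length := by omega
      simp only [pvBBack]
      rw [if_neg (by tauto)]
      simp [pvBackRef]
      omega
    · subst hD
      simp only [List.concat_eq_append] at hdrop hmem hfuel ⊢
      have hlt : head < dq.length := by
        have := congrArg List.length hdrop
        simp at this
        omega
      have hdqne : dq ≠ [] := by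
        intro h
        subst h
        simp at hlt
      have hlast : PySem.List.pyGetD dq (-1) 0 = (i : Int) := by
        rw [PySem.List.pyGetD_neg_one dq 0 hdqne]
        have h2 : dq.getLast? = some ((i : Nat) : Int) := by
          conv_lhs => rw [← List.take_append_drop head dq]
          rw [List.getLast?_append, hdrop]
          simp
        have h3 := List.getLast?_eq_some_getLast (l := dq) hdqne
        rw [h3] at h2
        simpa using h2
      have hcond : (PySem.List.pyGetD pre ((i : Nat) : Int) 0 ≥ PySem.List.pyGetD pre (jn : Int) 0) ↔
          (pvP arr jn ≤ pvP arr i) := by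
        rw [hpre jn hj, hpre i (hmem i (by simp))]
      simp only [pvBBack]
      by_cases hc : pvP arr jn ≤ pvP arr i
      · rw [if_pos ⟨hlt, by rw [hlast]; exact hcond.mpr hc⟩]
        have hdrop' : dq.dropLast.drop head = List.map (fun i : Nat => (i : Int)) D0 := by
          rw [← pvDropLast_drop, hdrop]
          simp
        have hrec := ih D0 dq.dropLast head
          (by simp [List.length_dropLast]; omega) hdrop'
          (fun a ha => hmem a (by simp [ha])) (by simp at hfuel; omega)
        rw [hrec, pvTake_dropLast dq head hlt]
        have hback : pvBackRef arr jn (D0 ++ [i]) = pvBackRef arr jn D0 := by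
          unfold pvBackRef
          rw [List.reverse_append]
          simp [hc]
        rw [hback]
      · rw [if_neg (by rintro ⟨_, hcc⟩; rw [hlast] at hcc; exact hc (hcond.mp hcc))]
        have hback : pvBackRef arr jn (D0 ++ [i]) = D0 ++ [i] := by
          unfold pvBackRef
          rw [List.reverse_append]
          simp [hc]
        rw [hback, ← hdrop, List.take_append_drop]

-- the fold of pvMinUpd computes the minimum of the start value and the folded values
lemma pvFoldMin_spec (vals : List Int) : ∀ (b : Int), (b = -1 ∨ 1 ≤ b) → (∀ v ∈ vals, 1 ≤ v) →
    (vals.foldl pvMinUpd b = -1 → (b = -1 ∧ vals = [])) ∧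
    (vals.foldl pvMinUpd b = b ∨ vals.foldl pvMinUpd b ∈ vals) ∧
    (b ≠ -1 → vals.foldl pvMinUpd b ≤ b) ∧
    (∀ v ∈ vals, vals.foldl pvMinUpd b ≤ v) ∧
    (vals.foldl pvMinUpd b = -1 ∨ 1 ≤ vals.foldl pvMinUpd b) := by
  induction vals with
  | nil => intro b hb _; simp [hb]
  | cons v vals ih =>
    intro b hb hv
    have hv1 : 1 ≤ v := hv v (by simp)
    have hb' : pvMinUpd b v = -1 ∨ 1 ≤ pvMinUpd b v := by
      unfold pvMinUpd
      split_ifs <;> omega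
    obtain ⟨i1, i2, i3, i4, i5⟩ := ih (pvMinUpd b v) hb' (fun w hw => hv w (by simp [hw]))
    have hmu_le_b : b ≠ -1 → pvMinUpd b v ≤ b := by
      intro hbne
      unfold pvMinUpd
      split_ifs <;> omega
    have hmu_le_v : pvMinUpd b v ≤ v := by
      unfold pvMinUpd
      split_ifs <;> omega
    have hmu_ne : pvMinUpd b v ≠ -1 := by
      unfold pvMinUpd
      split_ifs <;> omega
    refine ⟨?_, ?_, ?_, ?_, ?_⟩
    · intro h
      rw [List.foldl_cons] at h
      exact absurd (i1 h).1 hmu_ne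
    · rw [List.foldl_cons]
      rcases i2 with h | h
      · have hsplit : pvMinUpd b v = b ∨ pvMinUpd b v = v := by
          unfold pvMinUpd; split_ifs <;> simp
        rcases hsplit with h2 | h2
        · left; rw [h, h2]
        · right; rw [h, h2]; simp
      · right; simp [h]
    · intro hbne
      rw [List.foldl_cons]
      exact le_trans (i3 hmu_ne) (hmu_le_b hbne)
    · intro w hw
      rw [List.foldl_cons]
      rcases List.mem_cons.mp hw with h | h
      · subst h; exact le_trans (i3 hmu_ne) hmu_le_v
      · exact i4 w h
    · rw [List.foldl_cons]; exact i5

-- in a list with strictly increasing pre values, every qualifying index is in the takeWhile prefix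
lemma pvQual_mem_takeWhile (arr : List Int) (x : Int) (jn : Nat) :
    ∀ (D : List Nat), (D.map (pvP arr)).Pairwise (· < ·) →
    ∀ e ∈ D, pvQ arr x jn e = true → e ∈ D.takeWhile (pvQ arr x jn) := by
  intro D
  induction D with
  | nil => intro _ e he; simp at he
  | cons d D ih =>
    intro hpw e he hq
    rw [List.map_cons, List.pairwise_cons] at hpw
    by_cases hd : pvQ arr x jn d = true
    · rw [List.takeWhile_cons_of_pos hd]
      rcases List.mem_cons.mp he with h | h
      · simp [h]
      · exact List.mem_cons_of_mem _ (ih hpw.2 e h hq)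
    · exfalso
      rcases List.mem_cons.mp he with h | h
      · subst h; exact hd hq
      · have hde : pvP arr d < pvP arr e := hpw.1 _ (List.mem_map_of_mem h)
        simp only [pvQ, decide_eq_true_eq] at hq hd
        omega

lemma pvBackRef_sublist (arr : List Int) (jn : Nat) (D : List Nat) :
    (pvBackRef arr jn D).Sublist D := by
  unfold pvBackRef
  have h1 := List.dropWhile_suffix (l := D.reverse) (fun i => decide (pvP arr jn ≤ pvP arr i))
  have h2 := h1.sublist
  have := h2.reverse
  simpa using this

-- removed back elements all have pre value ≥ pre[jn]
lemma pvBackRef_removed (arr : List Int) (jn : Nat) (D : List Nat) :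
    ∀ e ∈ D, e ∉ pvBackRef arr jn D → pvP arr jn ≤ pvP arr e := by
  intro e he hne
  have hsplit := List.takeWhile_append_dropWhile
    (p := fun i => decide (pvP arr jn ≤ pvP arr i)) (l := D.reverse)
  have herev : e ∈ D.reverse := by simpa using he
  rw [← hsplit] at herev
  rcases List.mem_append.mp herev with h | h
  · simpa using List.mem_takeWhile_imp h
  · exfalso
    apply hne
    unfold pvBackRef
    simpa using h

-- kept back elements all have pre value < pre[jn]
lemma pvBackRef_kept (arr : List Int) (jn : Nat) (D : List Nat)
    (hpw : (D.map (pvP arr)).Pairwise (· < ·)) :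
    ∀ e ∈ pvBackRef arr jn D, pvP arr e < pvP arr jn := by
  intro e he
  set p := fun i => decide (pvP arr jn ≤ pvP arr i) with hp
  have he' : e ∈ D.reverse.dropWhile p := by
    unfold pvBackRef at he
    simpa [← hp] using he
  have hpwrev : (D.reverse.dropWhile p).Pairwise (fun a b => pvP arr b < pvP arr a) := by
    have h1 : D.reverse.Pairwise (fun a b => pvP arr b < pvP arr a) := by
      rw [List.pairwise_reverse]
      exact List.pairwise_map.mp hpw
    exact h1.sublist (List.dropWhile_suffix p).sublist
  rcases hE : D.reverse.dropWhile p with _ | ⟨h0, t⟩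
  · rw [hE] at he'; simp at he'
  · rw [hE] at he' hpwrev
    have hhead : p h0 = false := by
      have := List.head_dropWhile_not p (l := D.reverse) (by rw [hE]; simp)
      simpa [hE] using this
    have hh0lt : pvP arr h0 < pvP arr jn := by
      rw [hp] at hhead
      simp at hhead
      omega
    rcases List.mem_cons.mp he' with rfl | hmem
    · exact hh0lt
    · rw [List.pairwise_cons] at hpwrev
      have := hpwrev.1 e hmem
      omega

-- "b is the minimum length over qualifying pairs below j0 (or -1 if none)"
def pvBestPred (arr : List Int) (x : Int) (j0 : Nat) (b : Int) : Prop :=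
  (b = -1 ∧ ∀ i j : Nat, i < j → j < j0 → pvP arr j - pvP arr i ≤ x) ∨
  ((∃ i j : Nat, i < j ∧ j < j0 ∧ pvP arr j - pvP arr i > x ∧ b = (j : Int) - (i : Int)) ∧
   (∀ i j : Nat, i < j → j < j0 → pvP arr j - pvP arr i > x → b ≤ (j : Int) - (i : Int)))

-- main loop invariant for Source B's 'for j in range(n+1)' loop
lemma pvBLoop_spec (arr pre : List Int) (x : Int) (N : Nat)
    (hpre : ∀ k : Nat, k ≤ N → PySem.List.pyGetD pre (k : Int) 0 = pvP arr k) :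
    ∀ (cnt jn : Nat) (best : Int) (dq : List Int) (head : Nat) (D : List Nat),
      jn + cnt = N + 1 →
      head ≤ dq.length →
      dq.drop head = List.map (fun i : Nat => (i : Int)) D →
      (∀ i ∈ D, i < jn) →
      D.Pairwise (· < ·) →
      (D.map (pvP arr)).Pairwise (· < ·) →
      (best = -1 ∨ 1 ≤ best) →
      pvBestPred arr x jn best →
      (∀ i : Nat, i < jn →
        (∃ i' ∈ D, i ≤ i' ∧ pvP arr i' ≤ pvP arr i) ∨ (best ≠ -1 ∧ best ≤ (jn : Int) - (i : Int))) →
      pvBestPred arr x (N + 1)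
        (pvBLoop pre x (PySem.List.pyRange (jn : Int) ((N : Int) + 1) 1) best dq head) := by
  intro cnt
  induction cnt with
  | zero =>
    intro jn best dq head D hcnt _ _ _ _ _ _ hbp _
    have hjn : jn = N + 1 := by omega
    subst hjn
    rw [PySem.List.pyRange_one_eq_nil (by omega)]
    simpa [pvBLoop] using hbp
  | succ cnt ih =>
    intro jn best dq head D hcnt hhead hdrop hmemD hpwD hpwP hbsign hbp hcov
    have hjnN : jn ≤ N := by omega
    have hcons : PySem.List.pyRange (jn : Int) ((N : Int) + 1) 1 =
        (jn : Int) :: PySem.List.pyRange ((jn + 1 : Nat) : Int) ((N : Int) + 1) 1 := by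
      rw [PySem.List.pyRange_one_cons (by omega)]
      norm_num
    rw [hcons]
    simp only [pvBLoop]
    have hmemN : ∀ i ∈ D, i ≤ N := fun i hi => by have := hmemD i hi; omega
    have hlenD : dq.length - head = D.length := by
      have := congrArg List.length hdrop
      simp at this
      omega
    set q := pvQ arr x jn with hq
    set Dp := D.takeWhile q with hDp
    set Dr := D.dropWhile q with hDr
    have hDsplit : Dp ++ Dr = D := List.takeWhile_append_dropWhile
    have hsubDp : Dp.Sublist D := List.takeWhile_sublist q
    have hsubDr : Dr.Sublist D := (List.dropWhile_suffix q).sublist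
    rw [pvBFront_bridge arr pre x N jn hpre hjnN D dq head (dq.length - head) best hhead hdrop
      hmemN (le_refl _)]
    dsimp only
    set bestF := Dp.foldl (fun (b : Int) (i : Nat) => pvMinUpd b ((jn : Int) - (i : Int))) best
      with hbF
    set head' := head + Dp.length with hh'
    have hh'le : head' ≤ dq.length := by
      have : Dp.length ≤ D.length := hsubDp.length_le
      omega
    have hdropDr : dq.drop head' = List.map (fun i : Nat => (i : Int)) Dr := by
      have hdd : List.drop Dp.length D = Dr := by rw [← hDsplit, List.drop_left]
      rw [hh', ← List.drop_drop, hdrop, ← List.map_drop, hdd]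
    rw [pvBBack_bridge arr pre N jn hpre hjnN dq.length Dr dq head' hh'le hdropDr
      (fun i hi => hmemN i (List.Sublist.mem hi hsubDr))
      (le_trans hsubDr.length_le (by omega))]
    set DB := pvBackRef arr jn Dr with hDB
    have hsubDB : DB.Sublist Dr := pvBackRef_sublist arr jn Dr
    have hsubDBD : DB.Sublist D := hsubDB.trans hsubDr
    have hpwPDr : (Dr.map (pvP arr)).Pairwise (· < ·) := hpwP.sublist (hsubDr.map _)
    -- the fold over the popped prefix as a fold of pvMinUpd over the recorded lengths
    set vals := List.map (fun i : Nat => ((jn : Int) - (i : Int))) Dp with hvals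
    have hfold : vals.foldl pvMinUpd best = bestF := by rw [hbF, hvals, List.foldl_map]
    have hv1 : ∀ v ∈ vals, 1 ≤ v := by
      rintro v hv
      rw [hvals] at hv
      obtain ⟨i, hiDp, rfl⟩ := List.mem_map.mp hv
      have := hmemD i (List.Sublist.mem hiDp hsubDp)
      omega
    obtain ⟨F1, F2, F3, F4, F5⟩ := pvFoldMin_spec vals best hbsign hv1
    rw [hfold] at F1 F2 F3 F4 F5
    have hqual_tw : ∀ e ∈ D, q e = true → e ∈ Dp := pvQual_mem_takeWhile arr x jn D hpwP
    have hDp_qual : ∀ e ∈ Dp, pvP arr jn - pvP arr e > x := by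
      intro e he
      have := List.mem_takeWhile_imp (x := e) (l := D) (p := q) he
      rw [hq] at this
      simpa [pvQ] using this
    -- the recorded value for a popped index bounds bestF
    have hF4' : ∀ i' ∈ Dp, bestF ≤ (jn : Int) - (i' : Int) := by
      intro i' hi'
      exact F4 _ (by rw [hvals]; exact List.mem_map_of_mem hi')
    have hFne : ∀ i' ∈ Dp, bestF ≠ -1 := by
      intro i' hi' hm1
      have := (F1 hm1).2
      rw [hvals, List.map_eq_nil_iff] at this
      rw [this] at hi'
      simp at hi'
    -- invariants for the next iteration
    have harg2 : head' ≤ ((dq.take head' ++ List.map (fun i : Nat => (i : Int)) DB) ++ [(jn : Int)]).length := by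
      simp [List.length_take]
      omega
    have harg3 : ((dq.take head' ++ List.map (fun i : Nat => (i : Int)) DB) ++ [(jn : Int)]).drop head' =
        List.map (fun i : Nat => (i : Int)) (DB ++ [jn]) := by
      rw [List.append_assoc]
      have htl : (dq.take head').length = head' := by simp [List.length_take]; omega
      have hgen : ∀ (a b : List Int), a.length = head' → (a ++ b).drop head' = b := by
        intro a b h
        rw [← h, List.drop_left]
      rw [hgen _ _ htl, List.map_append]
      simp
    have harg4 : ∀ i ∈ DB ++ [jn], i < jn + 1 := by
      intro i hi
      rcases List.mem_append.mp hi with h | h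
      · have := hmemD i (List.Sublist.mem h hsubDBD); omega
      · simp at h; omega
    have harg5 : (DB ++ [jn]).Pairwise (· < ·) := by
      rw [List.pairwise_append]
      exact ⟨hpwD.sublist hsubDBD, by simp,
        fun a ha b hb => by simp at hb; subst hb; exact hmemD a (List.Sublist.mem ha hsubDBD)⟩
    have harg6 : ((DB ++ [jn]).map (pvP arr)).Pairwise (· < ·) := by
      rw [List.map_append, List.pairwise_append]
      refine ⟨hpwP.sublist (hsubDBD.map _), by simp, ?_⟩
      intro a ha b hb
      simp at hb
      subst hb
      obtain ⟨e, he, rfl⟩ := List.mem_map.mp ha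
      exact pvBackRef_kept arr jn Dr hpwPDr e he
    have harg7 : bestF = -1 ∨ 1 ≤ bestF := F5
    have harg8 : pvBestPred arr x (jn + 1) bestF := by
      rcases F5 with hFm1 | hF1
      · obtain ⟨hbm1, hvnil⟩ := F1 hFm1
        rw [hvals, List.map_eq_nil_iff] at hvnil
        left
        refine ⟨hFm1, ?_⟩
        intro i j hij hjlt
        by_cases hjn : j < jn
        · rcases hbp with ⟨_, hno⟩ | ⟨⟨i0, j0, hij0, hj0, _, hbeq⟩, _⟩
          · exact hno i j hij hjn
          · exfalso; have := hmemD; omega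
        · have hjeq : j = jn := by omega
          subst hjeq
          by_contra hgt
          rw [not_le] at hgt
          rcases hcov i (by omega) with ⟨i', hi'D, hile, hPle⟩ | ⟨hbne, _⟩
          · have hqi' : q i' = true := by
              rw [hq]; simp [pvQ]; omega
            have := hqual_tw i' hi'D hqi'
            rw [hvnil] at this
            simp at this
          · exact hbne hbm1
      · right
        constructor
        · rcases F2 with hFb | hFv
          · have hbne : best ≠ -1 := by omega
            rcases hbp with ⟨hbm1, _⟩ | ⟨⟨i0, j0, hij0, hj0, hq0, hbeq⟩, _⟩
            · exact absurd hbm1 hbne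
            · exact ⟨i0, j0, hij0, by omega, hq0, by omega⟩
          · rw [hvals] at hFv
            obtain ⟨i0, hi0Dp, heq⟩ := List.mem_map.mp hFv
            exact ⟨i0, jn, by have := hmemD i0 (List.Sublist.mem hi0Dp hsubDp); omega, by omega,
              hDp_qual i0 hi0Dp, heq.symm⟩
        · intro i j hij hjlt hgt
          by_cases hjn : j < jn
          · rcases hbp with ⟨_, hno⟩ | ⟨⟨i0, j0, hij0, hj0, _, hbeq⟩, hminOld⟩
            · exact absurd hgt (by have := hno i j hij hjn; omega)
            · have hbne : best ≠ -1 := by omega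
              exact le_trans (F3 hbne) (hminOld i j hij hjn hgt)
          · have hjeq : j = jn := by omega
            subst hjeq
            rcases hcov i (by omega) with ⟨i', hi'D, hile, hPle⟩ | ⟨hbne, hble⟩
            · have hqi' : q i' = true := by
                rw [hq]; simp [pvQ]; omega
              have hi'Dp := hqual_tw i' hi'D hqi'
              have := hF4' i' hi'Dp
              omega
            · have := F3 hbne
              omega
    have harg9 : ∀ i : Nat, i < jn + 1 →
        (∃ i' ∈ DB ++ [jn], i ≤ i' ∧ pvP arr i' ≤ pvP arr i) ∨
        (bestF ≠ -1 ∧ bestF ≤ ((jn + 1 : Nat) : Int) - (i : Int)) := by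
      intro i hi
      by_cases hijn : i = jn
      · exact Or.inl ⟨jn, by simp, by omega, by simp [hijn]⟩
      · have hilt : i < jn := by omega
        rcases hcov i hilt with ⟨i', hi'D, hile, hPle⟩ | ⟨hbne, hble⟩
        · rw [← hDsplit] at hi'D
          rcases List.mem_append.mp hi'D with hi'Dp | hi'Dr
          · right
            refine ⟨hFne i' hi'Dp, ?_⟩
            have h1 := hF4' i' hi'Dp
            have h2 : i ≤ i' := hile
            push_cast
            omega
          · by_cases hkept : i' ∈ DB
            · exact Or.inl ⟨i', List.mem_append_left _ hkept, hile, hPle⟩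
            · have hge := pvBackRef_removed arr jn Dr i' hi'Dr hkept
              exact Or.inl ⟨jn, by simp, by omega, by omega⟩
        · right
          refine ⟨?_, ?_⟩
          · intro hm1; exact hbne (F1 hm1).1
          · have := F3 hbne
            push_cast
            omega
    exact ih (jn + 1) bestF ((dq.take head' ++ List.map (fun i : Nat => (i : Int)) DB) ++ [(jn : Int)])
      head' (DB ++ [jn]) (by omega) harg2 harg3 harg4 harg5 harg6 harg7 harg8 harg9

-- find? over [s, s+k) returns the least satisfying element
lemma pvFind_least (p : Nat → Bool) : ∀ (k s ln : Nat), s ≤ ln → ln < s + k → p ln = true →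
    (∀ m, s ≤ m → m < ln → p m = false) → (List.range' s k).find? p = some ln := by
  intro k
  induction k with
  | zero => intro s ln h1 h2 _ _; omega
  | succ k ih =>
    intro s ln h1 h2 h3 h4
    rw [List.range'_succ]
    by_cases hs : s = ln
    · subst hs
      rw [List.find?_cons_of_pos h3]
    · rw [List.find?_cons_of_neg (by simp [h4 s (le_refl _) (by omega)])]
      exact ih (s + 1) ln (by omega) (by omega) h3 (fun m hm hmlt => h4 m (by omega) hmlt)

lemma pvBestPred_ans (arr : List Int) (x : Int) (N : Nat) (b : Int)
    (h : pvBestPred arr x (N + 1) b) : b = pvAns arr x N := by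
  unfold pvAns
  rcases h with ⟨hb, hnone⟩ | ⟨⟨i, j, hij, hjN, hq, hb⟩, hmin⟩
  · rw [List.find?_eq_none.mpr ?_]
    · exact hb
    · intro ln hln
      rw [List.mem_range'_1] at hln
      simp only [Bool.not_eq_true]
      rw [← Bool.not_eq_true, pvOkL_iff arr x N ln (by omega)]
      rintro ⟨l, hl, hgt⟩
      have := hnone l (l + ln) (by omega) (by omega)
      omega
  · have hlnpos : 1 ≤ j - i := by omega
    have hlnN : j - i ≤ N := by omega
    have hok : pvOkL arr x N (j - i) = true := by
      rw [pvOkL_iff arr x N (j - i) hlnN]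
      exact ⟨i, by omega, by rw [show i + (j - i) = j by omega]; exact hq⟩
    have hmin' : ∀ m, 1 ≤ m → m < j - i → pvOkL arr x N m = false := by
      intro m h1 h2
      rw [← Bool.not_eq_true, pvOkL_iff arr x N m (by omega)]
      rintro ⟨l, hl, hgt⟩
      have := hmin l (l + m) (by omega) (by omega) hgt
      omega
    rw [pvFind_least (pvOkL arr x N) N 1 (j - i) hlnpos (by omega) hok
      (fun m hm hmlt => hmin' m hm hmlt)]
    show b = ((j - i : Nat) : Int)
    omega

-- the prefix list built by Source B's first loop
lemma pvPre_build : ∀ (xs p : List Int) (s : Int), p.getLast? = some s →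
    xs.foldl (fun p v => p ++ [PySem.List.pyGetD p (-1) 0 + v]) p
      = p ++ (List.range xs.length).map (fun k => s + (xs.take (k + 1)).sum) := by
  intro xs
  induction xs with
  | nil => intro p s _; simp
  | cons v xs ih =>
    intro p s hs
    have hpne : p ≠ [] := by rintro rfl; simp at hs
    rw [List.foldl_cons]
    have hget : PySem.List.pyGetD p (-1) 0 = s := by
      rw [PySem.List.pyGetD_neg_one p 0 hpne]
      have h3 := List.getLast?_eq_some_getLast (l := p) hpne
      rw [h3] at hs
      simpa using hs
    rw [hget, ih (p ++ [s + v]) (s + v) List.getLast?_concat, List.append_assoc]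
    congr 1
    rw [List.length_cons, List.range_succ_eq_map, List.map_cons, List.map_map]
    simp [Function.comp, List.take_succ_cons, add_assoc]

lemma pvPre_eq (arr : List Int) (N : Nat) (hlen : N ≤ arr.length) :
    ((arr.take N).foldl (fun p v => p ++ [PySem.List.pyGetD p (-1) 0 + v]) [(0 : Int)])
      = (List.range (N + 1)).map (fun k => pvP arr k) := by
  rw [pvPre_build (arr.take N) [0] 0 (by simp)]
  have hlen' : (arr.take N).length = N := by simp [hlen]
  rw [hlen', List.range_succ_eq_map, List.map_cons, List.map_map]
  have hmap : ∀ k ∈ List.range N,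
      ((0 : Int) + ((arr.take N).take (k + 1)).sum) = pvP arr (Nat.succ k) := by
    intro k hk
    rw [List.mem_range] at hk
    rw [List.take_take]
    have : min (k + 1) N = k + 1 := by omega
    rw [this, pvP]
    simp
  rw [List.map_congr_left (fun k hk => hmap k hk)]
  simp [pvP]

lemma pvPre_get (arr : List Int) (N : Nat) :
    ∀ k : Nat, k ≤ N →
      PySem.List.pyGetD ((List.range (N + 1)).map (fun k => pvP arr k)) (k : Int) 0 = pvP arr k := by
  intro k hk
  rw [PySem.List.pyGetD_natCast, List.getD_eq_getElem _ _ (by simp; omega)]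
  simp

lemma pvB_eq (arr : List Int) (n x : Int) (h0 : 0 < n) (hlen : n ≤ (arr.length : Int)) :
    smallestSubarrayV2_alt arr n x = pvAns arr x n.toNat := by
  obtain ⟨N, rfl⟩ : ∃ N : Nat, n = (N : Int) := ⟨n.toNat, by omega⟩
  rw [Int.toNat_natCast]
  have hlenN : N ≤ arr.length := by omega
  have hmain : smallestSubarrayV2_alt arr (N : Int) x =
      pvBLoop ((PySem.List.slice arr none (some (N : Int))).foldl
          (fun p v => p ++ [PySem.List.pyGetD p (-1) 0 + v]) [(0 : Int)]) x
        (PySem.List.pyRange 0 ((N : Int) + 1) 1) (-1) [] 0 := by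
    unfold smallestSubarrayV2_alt
    rw [if_neg (by omega)]
  rw [hmain, PySem.List.slice_to_natCast, pvPre_eq arr N hlenN]
  have h := pvBLoop_spec arr ((List.range (N + 1)).map (fun k => pvP arr k)) x N
    (pvPre_get arr N) (N + 1) 0 (-1) [] 0 [] (by omega) (by simp) (by simp) (by simp)
    (by simp) (by simp) (Or.inl rfl)
    (Or.inl ⟨rfl, fun i j _ hj => absurd hj (by omega)⟩)
    (fun i hi => absurd hi (by omega))
  simp only [Nat.cast_zero] at h
  exact pvBestPred_ans arr x N _ h

-- ===== VERDICT (by name: the statement is the Claim_ definition above) =====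
theorem smallestSubarrayV2_spec : Claim_equal_smallestSubarrayV2 := by
  intro arr n x _ hpre
  unfold Spec_smallestSubarrayV2
  by_cases h0 : 0 < n
  · rw [pvA_eq arr n x h0 hpre, pvB_eq arr n x h0 hpre]
  · have hn : n ≤ 0 := by omega
    have hb : smallestSubarrayV2_alt arr n x = -1 := by
      simp [smallestSubarrayV2_alt, hn]
    have ha : smallestSubarrayV2 arr n x = -1 := by
      have : PySem.List.pyRange 1 (n + 1) 1 = [] := PySem.List.pyRange_one_eq_nil (by omega)
      simp [smallestSubarrayV2, this, pvAOuter]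
    rw [ha, hb]
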